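-- pv_equiv track=rewrite | github.com/chaosWsF/Python-Practice | leetcode/0949_largest_time_for_given_digits.py | largestTimeFromDigits2
-- ===== SOURCE A (Python) =====
-- from itertools import permutations
--
-- def largestTimeFromDigits2(A):
--     max_minutes = -1
--     for a, b, c, d in permutations(A):
--         hour = a * 10 + b
--         minute = c * 10 + d
--         if hour < 24 and minute < 60:
--             max_minutes = max(60 * hour + minute, max_minutes)
--
--     if max_minutes == -1:
--         return ''
--     else:
--         return f'{max_minutes // 60:02}:{max_minutes % 60:02}'
-- ===== SOURCE B (Python) =====
-- def largestTimeFromDigits2(A):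
--     best = -1
--     # choose which unordered pair of positions supplies the hour digits (6 splits);
--     # within a split the best hour and best minute can be maximised independently
--     for (i, j), (k, l) in (((0, 1), (2, 3)), ((0, 2), (1, 3)), ((0, 3), (1, 2)),
--                            ((1, 2), (0, 3)), ((1, 3), (0, 2)), ((2, 3), (0, 1))):
--         x, y, u, v = A[i], A[j], A[k], A[l]
--         hours = [h for h in (x * 10 + y, y * 10 + x) if h < 24]
--         mins = [m for m in (u * 10 + v, v * 10 + u) if m < 60]
--         if hours and mins:
--             best = max(best, 60 * max(hours) + max(mins))
--
--     if best == -1: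
--         return ''
--     return f'{best // 60:02}:{best % 60:02}'
-- ===== Notes on version B (the rewrite author's own statement) =====
-- stated objective: alternative
-- what changed: Instead of scanning all 24 digit permutations, B enumerates the 6 unordered splits of the four positions into an hour pair and a minute pair and maximises the hour and the minute digit order independently within each split.
import Mathlib
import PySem

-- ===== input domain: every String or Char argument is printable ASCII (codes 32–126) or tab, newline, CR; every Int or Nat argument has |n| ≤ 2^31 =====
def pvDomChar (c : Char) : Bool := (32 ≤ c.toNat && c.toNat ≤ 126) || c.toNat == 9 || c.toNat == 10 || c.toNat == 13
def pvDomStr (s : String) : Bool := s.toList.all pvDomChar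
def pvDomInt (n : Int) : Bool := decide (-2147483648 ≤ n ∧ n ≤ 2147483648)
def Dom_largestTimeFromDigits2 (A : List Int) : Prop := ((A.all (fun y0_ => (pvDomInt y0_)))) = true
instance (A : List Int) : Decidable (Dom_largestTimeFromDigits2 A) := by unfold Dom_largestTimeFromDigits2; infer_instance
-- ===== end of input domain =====

-- B replaces the 24-permutation scan by the 6 hour/minute position splits with independent
-- digit-order maximisation (objective: alternative decomposition, same result).


-- f'{n:02}' (exact for the reachable widths: |str n| ≤ 2 never needs a pad through the sign)
def pvFmt02 (n : Int) : String :=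
  let s := PySem.Int.toStr n
  if s.length < 2 then "0" ++ s else s

-- ===== PORT A =====
-- itertools.permutations in index order: pick each element in turn, permute the rest
def pvSelect : List Int → List (Int × List Int)
  | [] => []
  | x :: xs => (x, xs) :: (pvSelect xs).map (fun p => (p.1, x :: p.2))

def pvPermsN : Nat → List Int → List (List Int)
  | 0, _ => [[]]
  | n + 1, l => (pvSelect l).flatMap (fun p => (pvPermsN n p.2).map (p.1 :: ·))

-- one loop iteration of A ('for a, b, c, d in permutations(A)'); a tuple that is not
-- length 4 makes Python raise ValueError (excluded by Pre_), the state is left unchanged there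
def pvStepA (mm : Int) (p : List Int) : Int :=
  match p with
  | [a, b, c, d] =>
      let hour := a * 10 + b
      let minute := c * 10 + d
      if hour < 24 ∧ minute < 60 then max (60 * hour + minute) mm else mm
  | _ => mm

def largestTimeFromDigits2 (A : List Int) : String :=
  let maxMinutes := (pvPermsN A.length A).foldl pvStepA (-1)
  if maxMinutes == -1 then ""
  else pvFmt02 (PySem.Int.floordiv maxMinutes 60) ++ ":" ++ pvFmt02 (PySem.Int.mod maxMinutes 60)

-- ===== PORT B =====
-- the six splits of positions {0,1,2,3} into (hour pair, minute pair)
def pvSplits : List ((Nat × Nat) × (Nat × Nat)) :=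
  [((0, 1), (2, 3)), ((0, 2), (1, 3)), ((0, 3), (1, 2)),
   ((1, 2), (0, 3)), ((1, 3), (0, 2)), ((2, 3), (0, 1))]

-- loop body on the four digits of one split (Source B's comprehensions / max / conditional)
def pvStepBCore (best x y u v : Int) : Int :=
  let hours := [x * 10 + y, y * 10 + x].filter (fun h => h < 24)
  let mins := [u * 10 + v, v * 10 + u].filter (fun m => m < 60)
  match PySem.List.max? hours (fun h => h), PySem.List.max? mins (fun m => m) with
  | some h, some m => max best (60 * h + m)
  | _, _ => best

def pvStepB (A : List Int) (best : Int) (s : (Nat × Nat) × (Nat × Nat)) : Int :=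
  pvStepBCore best (A.getD s.1.1 0) (A.getD s.1.2 0) (A.getD s.2.1 0) (A.getD s.2.2 0)

def largestTimeFromDigits2_alt (A : List Int) : String :=
  let best := pvSplits.foldl (pvStepB A) (-1)
  if best == -1 then ""
  else pvFmt02 (PySem.Int.floordiv best 60) ++ ":" ++ pvFmt02 (PySem.Int.mod best 60)

-- ===== PRECONDITION & SPEC =====
-- Pre_ excludes only the inputs on which A raises: unpacking 'a, b, c, d' raises
-- ValueError unless the list has exactly four elements.
def Pre_largestTimeFromDigits2 (A : List Int) : Prop := A.length = 4
instance (A : List Int) : Decidable (Pre_largestTimeFromDigits2 A) := by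
  unfold Pre_largestTimeFromDigits2; infer_instance

def pvWitness_largestTimeFromDigits2 : List Int := [1, 2, 3, 4]

def Spec_largestTimeFromDigits2 (A : List Int) (out : String) : Prop := out = largestTimeFromDigits2_alt A
instance (A : List Int) (out : String) : Decidable (Spec_largestTimeFromDigits2 A out) := by unfold Spec_largestTimeFromDigits2; infer_instance

-- ===== CLAIM (what is proved, stated in full; the proofs are below) =====
def Claim_equal_largestTimeFromDigits2 : Prop := ∀ (A : List Int), Dom_largestTimeFromDigits2 A → Pre_largestTimeFromDigits2 A → Spec_largestTimeFromDigits2 A (largestTimeFromDigits2 A)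

-- ===== LEMMAS AND PROOFS =====

-- the candidate value 1 permutation contributes: its time if valid, else the neutral -1
def pvCand (p : List Int) : Int :=
  match p with
  | [a, b, c, d] =>
      if a * 10 + b < 24 ∧ c * 10 + d < 60 then 60 * (a * 10 + b) + (c * 10 + d) else -1
  | _ => -1

theorem stepA_eq (mm : Int) (p : List Int) (h : -1 ≤ mm) :
    pvStepA mm p = max mm (pvCand p) := by
  rcases p with _ | ⟨a, _ | ⟨b, _ | ⟨c, _ | ⟨d, _ | t⟩⟩⟩⟩ <;>
    simp [pvStepA, pvCand] <;> first
      | (split_ifs <;> omega)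
      | omega

theorem foldA_eq (l : List (List Int)) (mm : Int) (h : -1 ≤ mm) :
    l.foldl pvStepA mm = l.foldl (fun m p => max m (pvCand p)) mm := by
  induction l generalizing mm with
  | nil => rfl
  | cons p t ih =>
      simp only [List.foldl_cons, stepA_eq mm p h]
      exact ih _ (le_trans h (le_max_left _ _))

theorem stepBCore_eq (best x y u v : Int) (h : -1 ≤ best) :
    pvStepBCore best x y u v =
      max (max (max (max best (pvCand [x, y, u, v])) (pvCand [x, y, v, u]))
        (pvCand [y, x, u, v])) (pvCand [y, x, v, u]) := by
  unfold pvStepBCore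
  by_cases h1 : x * 10 + y < 24 <;> by_cases h2 : y * 10 + x < 24 <;>
    by_cases h3 : u * 10 + v < 60 <;> by_cases h4 : v * 10 + u < 60 <;>
    simp [h1, h2, h3, h4, PySem.List.max?, pvCand] <;> first
      | (split_ifs <;> (try simp_all) <;> omega)
      | omega

theorem neg1_le_core (best x y u v : Int) (h : -1 ≤ best) :
    -1 ≤ pvStepBCore best x y u v := by
  unfold pvStepBCore
  dsimp only
  split
  · omega
  · omega

theorem core_eq (a b c d : Int) :
    (pvPermsN 4 [a, b, c, d]).foldl pvStepA (-1) =
      pvSplits.foldl (pvStepB [a, b, c, d]) (-1) := by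
  have hA : (pvPermsN 4 [a, b, c, d]).foldl pvStepA (-1) =
      (pvPermsN 4 [a, b, c, d]).foldl (fun m p => max m (pvCand p)) (-1) :=
    foldA_eq _ _ (by norm_num)
  rw [hA]
  simp only [pvPermsN, pvSelect, List.flatMap, List.map, List.flatten, List.append,
    List.foldl, pvSplits, pvStepB, List.getD]
  rw [stepBCore_eq _ _ _ _ _ (by
    repeat' apply neg1_le_core
    norm_num)]
  rw [stepBCore_eq _ _ _ _ _ (by
    repeat' apply neg1_le_core
    norm_num)]
  rw [stepBCore_eq _ _ _ _ _ (by
    repeat' apply neg1_le_core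
    norm_num)]
  rw [stepBCore_eq _ _ _ _ _ (by
    repeat' apply neg1_le_core
    norm_num)]
  rw [stepBCore_eq _ _ _ _ _ (by
    repeat' apply neg1_le_core
    norm_num)]
  rw [stepBCore_eq _ _ _ _ _ (by norm_num)]
  ac_rfl

-- ===== VERDICT (by name: the statement is the Claim_ definition above) =====
theorem largestTimeFromDigits2_spec : Claim_equal_largestTimeFromDigits2 := by
  intro A _ hpre
  unfold Pre_largestTimeFromDigits2 at hpre
  rcases A with _ | ⟨a, _ | ⟨b, _ | ⟨c, _ | ⟨d, _ | t⟩⟩⟩⟩ <;> simp_all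
  unfold Spec_largestTimeFromDigits2 largestTimeFromDigits2 largestTimeFromDigits2_alt
  simp only [List.length_cons, List.length_nil]
  rw [show ((0:Nat)+1+1+1+1) = 4 from rfl, core_eq]
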